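-- pv_equiv track=rewrite | github.com/matthewcarbone/GGCE | ggce/utils/utils.py | configuration_space_generator
-- ===== SOURCE A (Python) =====
-- def configuration_space_generator(length, total_sum):
--     """Generator for yielding all possible combinations of integers of length
--     `length` that sum to total_sum. Not that cases such as length = 4 and
--     total_sum = 5 like [0, 0, 2, 3] need to be screened out, since these do
--     not correspond to valid f-functions.
--
--     Source of algorithm:
--     https://stackoverflow.com/questions/7748442/
--     generate-all-possible-lists-of-length-n-that-sum-to-s-in-python
--     """
--
--     if length == 1:
--         yield (total_sum,)
--     else:
--         for value in range(total_sum + 1):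
--             for permutation in configuration_space_generator(
--                 length - 1, total_sum - value
--             ):
--                 r = (value,) + permutation
--                 yield r
-- ===== SOURCE B (Python) =====
-- def configuration_space_generator(length, total_sum):
--     # Iterative breadth-first construction: grow all prefixes level by level
--     # (A recurses depth-first on the suffix). Return-value equivalent for length >= 1.
--     frontier = [((), total_sum)]
--     for _ in range(length - 1):
--         if not frontier:
--             return
--         frontier = [(p + (v,), r - v) for p, r in frontier for v in range(r + 1)]
--     for p, r in frontier:
--         yield p + (r,)
-- ===== Notes on version B (the rewrite author's own statement) =====
-- stated objective: alternative
-- what changed: Replaces A's depth-first recursion on the suffix length with an iterative breadth-first loop that grows all prefixes level by level in a single frontier list.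
-- outside the precondition, e.g. on configuration_space_generator(0, 2): A raises RecursionError, B returns [(2,)]; on configuration_space_generator(-1, -1): A returns [], B returns [(-1,)]
import Mathlib
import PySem

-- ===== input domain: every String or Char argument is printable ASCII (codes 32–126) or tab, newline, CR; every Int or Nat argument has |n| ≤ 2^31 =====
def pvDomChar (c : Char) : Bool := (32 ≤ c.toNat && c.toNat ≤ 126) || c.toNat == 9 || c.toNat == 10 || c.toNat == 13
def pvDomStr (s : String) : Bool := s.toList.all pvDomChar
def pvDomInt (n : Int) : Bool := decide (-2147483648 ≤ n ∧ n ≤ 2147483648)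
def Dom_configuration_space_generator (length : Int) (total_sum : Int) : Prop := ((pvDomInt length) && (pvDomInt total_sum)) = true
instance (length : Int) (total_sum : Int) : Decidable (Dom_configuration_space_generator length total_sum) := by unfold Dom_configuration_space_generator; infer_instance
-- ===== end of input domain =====

-- B replaces A's depth-first recursion on the suffix with an iterative breadth-first
-- frontier of prefixes (alternative decomposition, same cost); return values only (both are generators).

-- ===== PORT A =====
-- Recursion of A, on the Nat image of `length` (for length ≤ 0 Python recurses forever,
-- RecursionError; those inputs are outside Pre_, the 0-fuel branch is never claimed about).
def csgAux : Nat → Int → List (List Int)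
  | 0, _ => []
  | 1, total_sum => [[total_sum]]
  | n+2, total_sum =>
      (PySem.List.pyRange 0 (total_sum + 1) 1).foldl
        (fun acc value =>
          acc ++ (csgAux (n+1) (total_sum - value)).map (fun permutation => value :: permutation))
        []

def configuration_space_generator (length : Int) (total_sum : Int) : List (List Int) :=
  csgAux length.toNat total_sum

-- ===== PORT B =====
def csgStep (fr : List (List Int × Int)) : List (List Int × Int) :=
  fr.flatMap (fun pr =>
    (PySem.List.pyRange 0 (pr.2 + 1) 1).map (fun v => (pr.1 ++ [v], pr.2 - v)))

-- Source B's `for _ in range(length-1)` loop with its `if not frontier: return` break.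
def csgLoop : Nat → List (List Int × Int) → List (List Int × Int)
  | 0, fr => fr
  | n+1, fr => if fr.isEmpty then fr else csgLoop n (csgStep fr)

def configuration_space_generator_alt (length : Int) (total_sum : Int) : List (List Int) :=
  (csgLoop (length - 1).toNat [([], total_sum)]).map (fun pr => pr.1 ++ [pr.2])

-- ===== PRECONDITION & SPEC =====
-- Pre_ excludes the degenerate length ≤ 0, outside the function's natural domain: there A raises
-- RecursionError when total_sum ≥ 0, and its empty result when total_sum < 0 is an accident of the
-- unguarded recursion, which B does not mirror.
def Pre_configuration_space_generator (length : Int) (total_sum : Int) : Prop := 1 ≤ length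
instance (length : Int) (total_sum : Int) : Decidable (Pre_configuration_space_generator length total_sum) := by unfold Pre_configuration_space_generator; infer_instance
def pvWitness_configuration_space_generator : Int × Int := (3, 4)

def Spec_configuration_space_generator (length : Int) (total_sum : Int) (out : List (List Int)) : Prop := out = configuration_space_generator_alt length total_sum
instance (length : Int) (total_sum : Int) (out : List (List Int)) : Decidable (Spec_configuration_space_generator length total_sum out) := by unfold Spec_configuration_space_generator; infer_instance

-- ===== CLAIM (what is proved, stated in full; the proofs are below) =====
def Claim_equal_configuration_space_generator : Prop := ∀ (length : Int) (total_sum : Int), Dom_configuration_space_generator length total_sum → Pre_configuration_space_generator length total_sum → Spec_configuration_space_generator length total_sum (configuration_space_generator length total_sum)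

-- ===== LEMMAS AND PROOFS =====

-- A's foldl-append loop as a flatMap.
theorem csgAux_succ_succ (n : Nat) (ts : Int) :
    csgAux (n+2) ts =
      (PySem.List.pyRange 0 (ts + 1) 1).flatMap
        (fun v => (csgAux (n+1) (ts - v)).map (fun p => v :: p)) := by
  rw [csgAux, PySem.List.foldl_append_eq_flatMap]
  simp

theorem csgStep_iterate_nil (n : Nat) : csgStep^[n] ([] : List (List Int × Int)) = [] := by
  induction n with
  | zero => rfl
  | succ n ih => rw [Function.iterate_succ_apply]; simpa [csgStep] using ih

-- the early `return` on an empty frontier does not change the value of the loop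
theorem csgLoop_eq_iterate (n : Nat) (fr : List (List Int × Int)) :
    csgLoop n fr = csgStep^[n] fr := by
  induction n generalizing fr with
  | zero => rfl
  | succ n ih =>
      rw [csgLoop]
      cases fr with
      | nil => simp [csgStep_iterate_nil]
      | cons x l => rw [if_neg (by simp), ih, Function.iterate_succ_apply]

-- Invariant of B's breadth-first loop, against A's recursion.
theorem csg_main (n : Nat) (fr : List (List Int × Int)) :
    (csgStep^[n] fr).map (fun pr => pr.1 ++ [pr.2]) =
      fr.flatMap (fun pr => (csgAux (n+1) pr.2).map (fun p => pr.1 ++ p)) := by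
  induction n generalizing fr with
  | zero =>
      induction fr with
      | nil => rfl
      | cons x fr ihfr => simp_all [csgAux]
  | succ n ih =>
      rw [Function.iterate_succ_apply, ih]
      unfold csgStep
      rw [List.flatMap_assoc]
      apply List.flatMap_congr
      intro pr _
      rw [csgAux_succ_succ, List.flatMap_map, List.map_flatMap]
      apply List.flatMap_congr
      intro v _
      simp

-- ===== VERDICT =====
theorem configuration_space_generator_spec : Claim_equal_configuration_space_generator := by
  intro length total_sum _ hpre
  unfold Pre_configuration_space_generator at hpre
  unfold Spec_configuration_space_generator configuration_space_generator
    configuration_space_generator_alt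
  obtain ⟨n, hn⟩ : ∃ n : Nat, length.toNat = n + 1 := by
    refine ⟨length.toNat - 1, ?_⟩
    omega
  have hn' : (length - 1).toNat = n := by omega
  rw [hn, hn', csgLoop_eq_iterate, csg_main]
  simp
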